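-- pv_equiv track=rewrite | github.com/roiei/ca | syntax_parser/syntax_parser_hpp.py | __remove_whitespace_between_delimeter
-- ===== SOURCE A (Python) =====
-- def __remove_whitespace_between_delimeter(expr, opn, close):
--     n = len(expr)
--     opn_cnt = 0
--     i = 0
--     res = ''
--
--     while i < n:
--         if expr[i] == opn:
--             opn_cnt += 1
--         elif expr[i] == close:
--             opn_cnt -= 1
--
--         if opn_cnt == 0:
--             res += expr[i]
--         elif opn_cnt > 0:
--             if expr[i] != ' ':
--                 res += expr[i]
--         i += 1
--     return res
-- ===== SOURCE B (Python) =====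
-- def __remove_whitespace_between_delimeter(expr, opn, close):
--     # Segment-based: jump between delimiter occurrences, handling each maximal
--     # delimiter-free run wholesale (slice kept, space-stripped, or dropped by the
--     # sign of the current nesting depth); the depth counter is only touched at
--     # delimiter characters.
--     n = len(expr)
--     parts = []
--     d = 0
--     i = 0
--     while i < n:
--         j = i
--         while j < n and expr[j] != opn and expr[j] != close:
--             j += 1
--         seg = expr[i:j]
--         if d == 0:
--             parts.append(seg)
--         elif d > 0:
--             parts.append(seg.replace(' ', ''))
--         # d < 0: segment dropped entirely
--         if j < n:
--             c = expr[j]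
--             d += 1 if c == opn else -1
--             if d == 0 or (d > 0 and c != ' '):
--                 parts.append(c)
--         i = j + 1
--     return ''.join(parts)
-- ===== Notes on version B (the rewrite author's own statement) =====
-- stated objective: faster
-- what changed: Replaces A's per-character loop carrying a counter and a growing result string with a segment-based scan: it jumps between delimiter occurrences and handles each maximal delimiter-free run wholesale (slice kept, space-stripped via replace, or dropped by the sign of the depth), touching the depth counter only at delimiter characters.
import Mathlib
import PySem

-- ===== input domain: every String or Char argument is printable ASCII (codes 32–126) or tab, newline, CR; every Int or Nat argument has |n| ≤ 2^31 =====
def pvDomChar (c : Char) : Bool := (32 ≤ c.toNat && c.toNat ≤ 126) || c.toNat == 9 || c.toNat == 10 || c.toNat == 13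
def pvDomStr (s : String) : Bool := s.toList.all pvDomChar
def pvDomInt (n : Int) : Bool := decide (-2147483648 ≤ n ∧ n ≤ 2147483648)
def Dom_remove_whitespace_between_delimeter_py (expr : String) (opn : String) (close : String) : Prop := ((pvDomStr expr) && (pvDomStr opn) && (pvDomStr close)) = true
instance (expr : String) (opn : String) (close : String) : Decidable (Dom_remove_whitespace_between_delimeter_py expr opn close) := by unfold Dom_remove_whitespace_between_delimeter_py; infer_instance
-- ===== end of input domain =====

-- B replaces A's per-character counter loop by a segment-based scan that handles each delimiter-free run wholesale; faster by avoiding quadratic string concatenation.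


-- Python `expr[i] == s` compares the 1-char string expr[i] with s: true iff s is exactly that char.
def pvChEq (c : Char) (s : String) : Bool := s.toList == [c]

-- ===== PORT A =====
-- A's loop body: update the counter, then append the character by the counter's sign.
def pvStepA (opn close : String) (st : Int × List Char) (c : Char) : Int × List Char :=
  let opn_cnt : Int :=
    if pvChEq c opn then st.1 + 1
    else if pvChEq c close then st.1 - 1
    else st.1
  let res : List Char :=
    if opn_cnt = 0 then st.2 ++ [c]
    else if opn_cnt > 0 then (if c ≠ ' ' then st.2 ++ [c] else st.2)
    else st.2
  (opn_cnt, res)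

-- while-loop over the characters, carrying (opn_cnt, res)
def remove_whitespace_between_delimeter_py (expr : String) (opn : String) (close : String) : String :=
  String.ofList (expr.toList.foldl (pvStepA opn close) (0, [])).2

-- ===== PORT B =====
def pvIsDelim (opn close : String) (c : Char) : Bool := pvChEq c opn || pvChEq c close

-- segment scan: take the maximal delimiter-free run, emit it by the sign of d,
-- then handle the delimiter character (if any) and recurse on the rest
def pvAltGo (opn close : String) (d : Int) (cs : List Char) : List Char :=
  let seg := cs.takeWhile (fun c => !(pvIsDelim opn close c))
  let out := if d = 0 then seg
             else if d > 0 then seg.filter (fun c => c != ' ')   -- seg.replace(' ', '')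
             else []
  match h : cs.dropWhile (fun c => !(pvIsDelim opn close c)) with
  | [] => out
  | c :: cs' =>
      let d' := if pvChEq c opn then d + 1 else d - 1
      out ++ (if d' = 0 ∨ (d' > 0 ∧ c ≠ ' ') then [c] else []) ++ pvAltGo opn close d' cs'
termination_by cs.length
decreasing_by
  have hle : (cs.dropWhile (fun c => !(pvIsDelim opn close c))).length ≤ cs.length :=
    (List.dropWhile_sublist _).length_le
  rw [h] at hle
  simp at hle
  omega

def remove_whitespace_between_delimeter_py_alt (expr : String) (opn : String) (close : String) : String :=
  String.ofList (pvAltGo opn close 0 expr.toList)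

-- ===== PRECONDITION & SPEC =====
def Spec_remove_whitespace_between_delimeter_py (expr : String) (opn : String) (close : String) (out : String) : Prop := out = remove_whitespace_between_delimeter_py_alt expr opn close
instance (expr : String) (opn : String) (close : String) (out : String) : Decidable (Spec_remove_whitespace_between_delimeter_py expr opn close out) := by unfold Spec_remove_whitespace_between_delimeter_py; infer_instance

-- ===== CLAIM (what is proved, stated in full; the proofs are below) =====
def Claim_equal_remove_whitespace_between_delimeter_py : Prop := ∀ (expr : String) (opn : String) (close : String), Dom_remove_whitespace_between_delimeter_py expr opn close → Spec_remove_whitespace_between_delimeter_py expr opn close (remove_whitespace_between_delimeter_py expr opn close)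

-- ===== LEMMAS AND PROOFS =====

-- head of a non-empty dropWhile falsifies the predicate
theorem pvDropWhile_head_false {p : Char → Bool} : ∀ {cs : List Char} {c : Char} {cs' : List Char},
    cs.dropWhile p = c :: cs' → p c = false := by
  intro cs
  induction cs with
  | nil => intro c cs' h; cases h
  | cons a as ih =>
      intro c cs' h
      by_cases hpa : p a = true
      · rw [List.dropWhile_cons_of_pos hpa] at h; exact ih h
      · rw [List.dropWhile_cons_of_neg hpa] at h
        cases h
        simpa using hpa

-- unfolding pvAltGo when there is no delimiter left
theorem pvAltGo_nil (opn close : String) (d : Int) (cs : List Char)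
    (hdw : cs.dropWhile (fun c => !(pvIsDelim opn close c)) = []) :
    pvAltGo opn close d cs
      = (if d = 0 then cs.takeWhile (fun c => !(pvIsDelim opn close c))
         else if d > 0 then (cs.takeWhile (fun c => !(pvIsDelim opn close c))).filter (fun c => c != ' ')
         else []) := by
  rw [pvAltGo]
  split
  · rfl
  · rename_i c cs' h
    rw [hdw] at h
    cases h

-- unfolding pvAltGo at a delimiter
theorem pvAltGo_cons (opn close : String) (d : Int) (cs : List Char) (c : Char) (cs' : List Char)
    (hdw : cs.dropWhile (fun c => !(pvIsDelim opn close c)) = c :: cs') :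
    pvAltGo opn close d cs
      = (if d = 0 then cs.takeWhile (fun c => !(pvIsDelim opn close c))
         else if d > 0 then (cs.takeWhile (fun c => !(pvIsDelim opn close c))).filter (fun c => c != ' ')
         else [])
        ++ (if (if pvChEq c opn then d + 1 else d - 1) = 0
              ∨ ((if pvChEq c opn then d + 1 else d - 1) > 0 ∧ c ≠ ' ')
            then [c] else [])
        ++ pvAltGo opn close (if pvChEq c opn then d + 1 else d - 1) cs' := by
  rw [pvAltGo]
  split
  · rename_i h
    rw [hdw] at h
    cases h
  · rename_i c1 cs1 h
    rw [hdw] at h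
    cases h
    rfl

-- A's fold over a delimiter-free run: the counter is unchanged and the run is
-- emitted whole / space-stripped / dropped according to the sign of d.
theorem pvSeg_fold (opn close : String) : ∀ (cs : List Char),
    (∀ c ∈ cs, pvIsDelim opn close c = false) → ∀ (d : Int) (res : List Char),
    cs.foldl (pvStepA opn close) (d, res)
      = (d, res ++ (if d = 0 then cs else if d > 0 then cs.filter (fun c => c != ' ') else [])) := by
  intro cs
  induction cs with
  | nil => intro _ d res; simp
  | cons c cs ih =>
      intro h d res
      have hc : pvIsDelim opn close c = false := h c (by simp)
      have ho : pvChEq c opn = false := by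
        simp [pvIsDelim] at hc; exact hc.1
      have hcl : pvChEq c close = false := by
        simp [pvIsDelim] at hc; exact hc.2
      have hrest : ∀ x ∈ cs, pvIsDelim opn close x = false := fun x hx => h x (by simp [hx])
      simp only [List.foldl_cons]
      rw [show pvStepA opn close (d, res) c
            = (d, if d = 0 then res ++ [c]
                  else if d > 0 then (if c ≠ ' ' then res ++ [c] else res) else res) by
        simp [pvStepA, ho, hcl]]
      rw [ih hrest]
      by_cases h0 : d = 0
      · simp [h0]
      · by_cases hp : d > 0
        · by_cases hs : c = ' '
          · simp [h0, hp, hs]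
          · simp [h0, hp, hs]
        · simp [h0, hp]

-- A's step at a delimiter character, written in B's shape
theorem pvStepA_delim (opn close : String) (d : Int) (L : List Char) (c : Char)
    (hcdelim : pvIsDelim opn close c = true) :
    pvStepA opn close (d, L) c
      = ((if pvChEq c opn then d + 1 else d - 1),
         L ++ (if (if pvChEq c opn then d + 1 else d - 1) = 0
                 ∨ ((if pvChEq c opn then d + 1 else d - 1) > 0 ∧ c ≠ ' ')
               then [c] else [])) := by
  by_cases ho : pvChEq c opn = true
  · simp only [pvStepA, ho, if_true]
    by_cases h0 : d + 1 = 0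
    · simp [h0]
    · by_cases hpos : d + 1 > 0
      · by_cases hs : c = ' ' <;> simp [h0, hpos, hs]
      · have : ¬ (0 : Int) < d + 1 := by omega
        simp [h0, this]
  · have ho' : pvChEq c opn = false := by simpa using ho
    have hcl : pvChEq c close = true := by
      simp [pvIsDelim, ho'] at hcdelim; exact hcdelim
    simp only [pvStepA, ho', hcl, Bool.false_eq_true, if_false, if_true]
    by_cases h0 : d - 1 = 0
    · simp [h0]
    · by_cases hpos : d - 1 > 0
      · have h1 : (1 : Int) < d := by omega
        by_cases hs : c = ' ' <;> simp [h0, h1, hs]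
      · have h1 : ¬ (1 : Int) < d := by omega
        simp [h0, h1]

-- the main invariant: A's fold computes B's segment recursion
theorem pvMain (opn close : String) : ∀ (n : ℕ) (cs : List Char), cs.length ≤ n →
    ∀ (d : Int) (res : List Char),
    (cs.foldl (pvStepA opn close) (d, res)).2 = res ++ pvAltGo opn close d cs := by
  intro n
  induction n with
  | zero =>
      intro cs hl d res
      have : cs = [] := List.eq_nil_of_length_eq_zero (Nat.le_zero.mp hl)
      subst this
      rw [pvAltGo]
      simp
  | succ n ih =>
      intro cs hl d res
      have hsplit : cs.takeWhile (fun c => !(pvIsDelim opn close c))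
          ++ cs.dropWhile (fun c => !(pvIsDelim opn close c)) = cs :=
        List.takeWhile_append_dropWhile
      have hseg : ∀ c ∈ cs.takeWhile (fun c => !(pvIsDelim opn close c)),
          pvIsDelim opn close c = false := by
        intro c hc
        have := List.mem_takeWhile_imp hc
        simpa using this
      conv_lhs => rw [← hsplit]
      rw [List.foldl_append, pvSeg_fold opn close _ hseg]
      cases hdw : cs.dropWhile (fun c => !(pvIsDelim opn close c)) with
      | nil => rw [pvAltGo_nil opn close d cs hdw]; simp
      | cons c cs' =>
          have hcdelim : pvIsDelim opn close c = true := by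
            have := pvDropWhile_head_false hdw
            simpa using this
          have hlen : cs'.length + 1 ≤ cs.length := by
            have hle : (cs.dropWhile (fun c => !(pvIsDelim opn close c))).length ≤ cs.length :=
              (List.dropWhile_sublist _).length_le
            rw [hdw] at hle; simpa using hle
          rw [pvAltGo_cons opn close d cs c cs' hdw, List.foldl_cons,
              pvStepA_delim opn close d _ c hcdelim,
              ih cs' (by omega) (if pvChEq c opn then d + 1 else d - 1) _]
          simp

-- ===== VERDICT (by name: the statement is the Claim_ definition above) =====
theorem remove_whitespace_between_delimeter_py_spec : Claim_equal_remove_whitespace_between_delimeter_py := by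
  intro expr opn close _
  unfold Spec_remove_whitespace_between_delimeter_py
  unfold remove_whitespace_between_delimeter_py remove_whitespace_between_delimeter_py_alt
  rw [pvMain opn close expr.toList.length expr.toList (le_refl _)]
  simp
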